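-- pv_equiv track=rewrite | github.com/mimi6612/at_coder | atcoder_beginners_section/practice_j.py | match_dream_eraser
-- ===== SOURCE A (Python) =====
-- def match_dream_eraser(string):
--     index = 0
--     length = len(string)
--     while(index < length):
--         sub_s = string[index:index+10]
--         if(sub_s in ["", "dream", "dreamer", "erase", "eraser"]):
--             return True
--
--         sub_string1 = string[index:index+5]
--         sub_string2 = string[index+5:index+10]
--         if(sub_string1 == "dream"):
--             if(sub_string2 == "erdre" or sub_string2 == "erera"):
--                 index += 7
--             else:
--                 index += 5
--         elif(sub_string1 == "erase"):
--             if(sub_string2 == "rdrea" or sub_string2 == "reras"):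
--                 index += 6
--             else:
--                 index += 5
--         else:
--             return False
-- ===== SOURCE B (Python) =====
-- def match_dream_eraser(string):
--     rev = string[::-1]
--     n = len(rev)
--     i = 0
--     while i < n:
--         for w in ("remaerd", "resare", "maerd", "esare"):
--             if rev.startswith(w, i):
--                 i += len(w)
--                 break
--         else:
--             return False
--         if i == n:
--             return True
-- ===== Notes on version B (the rewrite author's own statement) =====
-- stated objective: alternative
-- what changed: Replaces A's forward scan with 5/6/7-character lookahead jumps by reversing the string once and greedily matching the reversed words ('remaerd','resare','maerd','esare') as prefixes, which needs no lookahead because no reversed word is a prefix of another.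
-- outside the precondition, e.g. on match_dream_eraser(''): A returns None, B returns None
import Mathlib
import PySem

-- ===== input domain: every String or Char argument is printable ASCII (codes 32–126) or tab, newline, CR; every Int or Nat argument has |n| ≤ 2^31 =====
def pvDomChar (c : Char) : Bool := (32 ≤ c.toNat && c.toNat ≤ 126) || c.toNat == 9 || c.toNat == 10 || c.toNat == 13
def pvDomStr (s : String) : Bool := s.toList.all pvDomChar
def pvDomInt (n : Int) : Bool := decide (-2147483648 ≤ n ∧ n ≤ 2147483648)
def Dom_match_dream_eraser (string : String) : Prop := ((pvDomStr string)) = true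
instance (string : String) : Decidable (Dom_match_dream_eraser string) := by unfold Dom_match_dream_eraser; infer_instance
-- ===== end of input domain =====

-- B reverses the string once and greedily matches the reversed words as prefixes (no lookahead),
-- instead of A's forward scan with 5/6/7-character lookahead jumps; same O(n) cost, alternative algorithm.

-- ===== PORT A =====
-- A's while loop over `index`; slices string[index:index+k] are (drop index).take k (index is always ≥ 0).
def pvLoopA (cs : List Char) (index : Nat) : Bool :=
  if index < cs.length then
    if (cs.drop index).take 10 ∈ ([[], "dream".toList, "dreamer".toList, "erase".toList, "eraser".toList] : List (List Char)) then
      true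
    else
      if (cs.drop index).take 5 = "dream".toList then
        if (cs.drop (index + 5)).take 5 = "erdre".toList ∨ (cs.drop (index + 5)).take 5 = "erera".toList then
          pvLoopA cs (index + 7)
        else
          pvLoopA cs (index + 5)
      else if (cs.drop index).take 5 = "erase".toList then
        if (cs.drop (index + 5)).take 5 = "rdrea".toList ∨ (cs.drop (index + 5)).take 5 = "reras".toList then
          pvLoopA cs (index + 6)
        else
          pvLoopA cs (index + 5)
      else false
  else false  -- Python falls through and returns None here; Pre_ excludes the only input reaching it
termination_by cs.length - index

def match_dream_eraser (string : String) : Bool :=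
  pvLoopA string.toList 0

-- ===== PORT B =====
-- the reversed words tried in order by B's inner for loop
def pvWordsB : List (List Char) :=
  ["remaerd".toList, "resare".toList, "maerd".toList, "esare".toList]

-- helper for termination: every word found is nonempty
theorem pvWordsB_find_pos {r : List Char} {w : List Char}
    (h : pvWordsB.find? (fun w => w.isPrefixOf r) = some w) : 0 < w.length := by
  have hm := List.mem_of_find?_eq_some h
  fin_cases hm <;> decide

-- B's while loop: the for/break/else is the first reversed word that is a prefix at position i
def pvLoopB (rev : List Char) (n i : Nat) : Bool :=
  if _h : i < n then
    match hf : pvWordsB.find? (fun w => w.isPrefixOf (rev.drop i)) with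
    | some w =>
      if i + w.length = n then true else pvLoopB rev n (i + w.length)
    | none => false
  else false  -- Python falls through and returns None here; Pre_ excludes the only input reaching it
termination_by n - i
decreasing_by have := pvWordsB_find_pos hf; omega

def match_dream_eraser_alt (string : String) : Bool :=
  let rev := string.toList.reverse
  pvLoopB rev rev.length 0

-- ===== PRECONDITION & SPEC =====
-- Pre_ excludes only the empty string, on which A's loop body never runs and A returns None
-- (not a bool); B likewise returns None there.
def Pre_match_dream_eraser (string : String) : Prop := string ≠ ""
instance (string : String) : Decidable (Pre_match_dream_eraser string) := by unfold Pre_match_dream_eraser; infer_instance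
def pvWitness_match_dream_eraser : String := "dreamereraser"

def Spec_match_dream_eraser (string : String) (out : Bool) : Prop := out = match_dream_eraser_alt string
instance (string : String) (out : Bool) : Decidable (Spec_match_dream_eraser string out) := by unfold Spec_match_dream_eraser; infer_instance

-- ===== CLAIM (what is proved, stated in full; the proofs are below) =====
def Claim_equal_match_dream_eraser : Prop := ∀ (string : String), Dom_match_dream_eraser string → Pre_match_dream_eraser string → Spec_match_dream_eraser string (match_dream_eraser string)

-- ===== LEMMAS AND PROOFS =====

-- the forward words, and the language "concatenation of forward words"
def pvWordsF : List (List Char) :=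
  ["dream".toList, "dreamer".toList, "erase".toList, "eraser".toList]

def pvLang (W : List (List Char)) (l : List Char) : Prop :=
  ∃ ws : List (List Char), (∀ w ∈ ws, w ∈ W) ∧ l = ws.flatten

-- suffix-view of A's loop
def pvLoopA' (l : List Char) : Bool :=
  if hnil : l = [] then false
  else
    if l.take 10 ∈ ([[], "dream".toList, "dreamer".toList, "erase".toList, "eraser".toList] : List (List Char)) then
      true
    else if l.take 5 = "dream".toList then
      if (l.drop 5).take 5 = "erdre".toList ∨ (l.drop 5).take 5 = "erera".toList then
        pvLoopA' (l.drop 7)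
      else pvLoopA' (l.drop 5)
    else if l.take 5 = "erase".toList then
      if (l.drop 5).take 5 = "rdrea".toList ∨ (l.drop 5).take 5 = "reras".toList then
        pvLoopA' (l.drop 6)
      else pvLoopA' (l.drop 5)
    else false
termination_by l.length
decreasing_by all_goals (have := List.length_pos_iff.mpr hnil; simp [List.length_drop]; omega)

-- suffix-view of B's loop
def pvLoopB' (r : List Char) : Bool :=
  if hnil : r = [] then false
  else
    match hf : pvWordsB.find? (fun w => w.isPrefixOf r) with
    | some w => if r.drop w.length = [] then true else pvLoopB' (r.drop w.length)
    | none => false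
termination_by r.length
decreasing_by have := pvWordsB_find_pos hf; have := List.length_pos_iff.mpr hnil; simp [List.length_drop]; omega

theorem pvLoopA_eq (cs : List Char) (index : Nat) :
    pvLoopA cs index = pvLoopA' (cs.drop index) := by
  fun_induction pvLoopA cs index <;>
    rw [pvLoopA'] <;>
    simp_all [List.drop_eq_nil_iff, List.drop_drop, List.take_eq_nil_iff] <;>
    first
      | omega
      | (rename_i hlt hin
         rcases hin with h | h
         · omega
         · exact Or.inl h)

theorem pvLoopB_eq (rev : List Char) (i : Nat) :
    pvLoopB rev rev.length i = pvLoopB' (rev.drop i) := by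
  fun_induction pvLoopB rev rev.length i with
  | case1 i hlt w hf hend =>
      rw [pvLoopB', dif_neg (by simp [List.drop_eq_nil_iff]; omega)]
      split
      · rename_i w' hf'
        injection (hf.symm.trans hf') with h; subst h
        rw [if_pos (by simp [List.drop_drop, List.drop_eq_nil_iff]; omega)]
      · rename_i hf'
        exact absurd (hf.symm.trans hf') (by simp)
  | case2 i hlt w hf hend ih =>
      have hp : w.length ≤ rev.length - i := by
        have h1 := List.find?_some hf
        simp only [List.isPrefixOf_iff_prefix] at h1
        simpa using h1.length_le
      rw [pvLoopB', dif_neg (by simp [List.drop_eq_nil_iff]; omega)]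
      split
      · rename_i w' hf'
        injection (hf.symm.trans hf') with h; subst h
        rw [if_neg (by simp [List.drop_drop, List.drop_eq_nil_iff]; omega)]
        rw [ih, List.drop_drop, Nat.add_comm]
      · rename_i hf'
        exact absurd (hf.symm.trans hf') (by simp)
  | case3 i hlt hf =>
      rw [pvLoopB', dif_neg (by simp [List.drop_eq_nil_iff]; omega)]
      split
      · rename_i w' hf'
        exact absurd (hf.symm.trans hf') (by simp)
      · rfl
  | case4 i hlt =>
      rw [pvLoopB', dif_pos (by simp [List.drop_eq_nil_iff]; omega)]

theorem pvLang_nil (W : List (List Char)) : pvLang W [] := ⟨[], by simp, rfl⟩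

theorem pvLang_cons {W : List (List Char)} {w l : List Char} (hw : w ∈ W)
    (hl : pvLang W l) : pvLang W (w ++ l) := by
  obtain ⟨ws, h1, h2⟩ := hl
  exact ⟨w :: ws, by simp_all, by simp [h2]⟩

theorem pvLang_single {W : List (List Char)} {w : List Char} (hw : w ∈ W) : pvLang W w := by
  have := pvLang_cons hw (pvLang_nil W)
  simpa using this

theorem pvTake_decomp {l w : List Char} {n : Nat} (h : l.take n = w) : l = w ++ l.drop n := by
  conv_lhs => rw [← List.take_append_drop n l]
  rw [h]

theorem pvA_sound (l : List Char) (h : pvLoopA' l = true) : pvLang pvWordsF l := by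
  revert h
  fun_induction pvLoopA' l with
  | case1 => intro h; cases h
  | case2 l hnil hin =>
      intro _
      simp only [List.mem_cons, List.not_mem_nil, or_false] at hin
      rcases hin with h|h|h|h|h
      · rw [List.take_eq_nil_iff] at h
        rcases h with h|h
        · exact absurd h (by decide)
        · exact absurd h hnil
      all_goals
        (have h10 : l.length ≤ 10 := by
           have := congrArg List.length h
           rw [List.length_take] at this
           try rw [show (("dream".toList : List Char)).length = 5 from rfl] at this
           try rw [show (("dreamer".toList : List Char)).length = 7 from rfl] at this
           try rw [show (("erase".toList : List Char)).length = 5 from rfl] at this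
           try rw [show (("eraser".toList : List Char)).length = 6 from rfl] at this
           omega
         rw [List.take_of_length_le h10] at h
         subst h
         exact pvLang_single (by simp [pvWordsF]))
  | case3 l hnil hin h1 h2 ih =>
      intro hrec
      have e1 : l = "dream".toList ++ l.drop 5 := pvTake_decomp h1
      have e2 : l.drop 5 = ['e', 'r'] ++ l.drop 7 := by
        have ht : (l.drop 5).take 2 = ['e', 'r'] := by
          rcases h2 with h|h <;>
            (have := congrArg (List.take 2) h; simpa [List.take_take] using this)
        have := pvTake_decomp ht
        simpa [List.drop_drop] using this
      have e3 : l = "dreamer".toList ++ l.drop 7 := by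
        rw [e1, e2, ← List.append_assoc]; rfl
      rw [e3]
      exact pvLang_cons (by simp [pvWordsF]) (ih hrec)
  | case4 l hnil hin h1 h2 ih =>
      intro hrec
      rw [pvTake_decomp h1]
      exact pvLang_cons (by simp [pvWordsF]) (ih hrec)
  | case5 l hnil hin h1 h1' h2 ih =>
      intro hrec
      have e1 : l = "erase".toList ++ l.drop 5 := pvTake_decomp h1'
      have e2 : l.drop 5 = ['r'] ++ l.drop 6 := by
        have ht : (l.drop 5).take 1 = ['r'] := by
          rcases h2 with h|h <;>
            (have := congrArg (List.take 1) h; simpa [List.take_take] using this)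
        have := pvTake_decomp ht
        simpa [List.drop_drop] using this
      have e3 : l = "eraser".toList ++ l.drop 6 := by
        rw [e1, e2, ← List.append_assoc]; rfl
      rw [e3]
      exact pvLang_cons (by simp [pvWordsF]) (ih hrec)
  | case6 l hnil hin h1 h1' h2 ih =>
      intro hrec
      rw [pvTake_decomp h1']
      exact pvLang_cons (by simp [pvWordsF]) (ih hrec)
  | case7 l hnil hin h1 h1' => intro h; cases h

theorem pv_lit_dream : ("dream".toList : List Char) = ['d', 'r', 'e', 'a', 'm'] := rfl
theorem pv_lit_dreamer : ("dreamer".toList : List Char) = ['d', 'r', 'e', 'a', 'm', 'e', 'r'] := rfl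
theorem pv_lit_erase : ("erase".toList : List Char) = ['e', 'r', 'a', 's', 'e'] := rfl
theorem pv_lit_eraser : ("eraser".toList : List Char) = ['e', 'r', 'a', 's', 'e', 'r'] := rfl
theorem pv_lit_erdre : ("erdre".toList : List Char) = ['e', 'r', 'd', 'r', 'e'] := rfl
theorem pv_lit_erera : ("erera".toList : List Char) = ['e', 'r', 'e', 'r', 'a'] := rfl
theorem pv_lit_rdrea : ("rdrea".toList : List Char) = ['r', 'd', 'r', 'e', 'a'] := rfl
theorem pv_lit_reras : ("reras".toList : List Char) = ['r', 'e', 'r', 'a', 's'] := rfl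
theorem pv_lit_maerd : ("maerd".toList : List Char) = ['m', 'a', 'e', 'r', 'd'] := rfl
theorem pv_lit_remaerd : ("remaerd".toList : List Char) = ['r', 'e', 'm', 'a', 'e', 'r', 'd'] := rfl
theorem pv_lit_esare : ("esare".toList : List Char) = ['e', 's', 'a', 'r', 'e'] := rfl
theorem pv_lit_resare : ("resare".toList : List Char) = ['r', 'e', 's', 'a', 'r', 'e'] := rfl

theorem pvA_complete (ws : List (List Char)) (hw : ∀ w ∈ ws, w ∈ pvWordsF)
    (hne : ws.flatten ≠ []) : pvLoopA' ws.flatten = true := by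
  induction ws with
  | nil => simp at hne
  | cons w ws' ih =>
      have hwmem : w ∈ pvWordsF := hw w (by simp)
      have hwtl : ∀ x ∈ ws', x ∈ pvWordsF := fun x hx => hw x (by simp [hx])
      simp only [pvWordsF, List.mem_cons, List.not_mem_nil, or_false] at hwmem
      by_cases hrest : ws'.flatten = []
      · simp only [List.flatten_cons, hrest, List.append_nil]
        rcases hwmem with rfl|rfl|rfl|rfl <;>
          (rw [pvLoopA']; simp [pv_lit_dream, pv_lit_dreamer, pv_lit_erase, pv_lit_eraser, pv_lit_erdre, pv_lit_erera, pv_lit_rdrea, pv_lit_reras, pv_lit_maerd, pv_lit_remaerd, pv_lit_esare, pv_lit_resare])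
      · have hrec := ih hwtl hrest
        obtain ⟨w', ws'', rfl⟩ : ∃ w' ws'', ws' = w' :: ws'' := by
          cases ws' with
          | nil => simp at hrest
          | cons a b => exact ⟨a, b, rfl⟩
        have hw'mem : w' ∈ pvWordsF := hwtl w' (by simp)
        simp only [pvWordsF, List.mem_cons, List.not_mem_nil, or_false] at hw'mem
        simp only [List.flatten_cons] at hrec ⊢
        rw [pvLoopA']
        rcases hwmem with rfl|rfl|rfl|rfl <;> rcases hw'mem with rfl|rfl|rfl|rfl <;>
          (simp only [pv_lit_dream, pv_lit_dreamer, pv_lit_erase, pv_lit_eraser, pv_lit_erdre, pv_lit_erera, pv_lit_rdrea, pv_lit_reras, pv_lit_maerd, pv_lit_remaerd, pv_lit_esare, pv_lit_resare, List.cons_append, List.nil_append] at hrec ⊢; simp [hrec])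

theorem pvB_sound (r : List Char) (h : pvLoopB' r = true) : pvLang pvWordsB r := by
  revert h
  fun_induction pvLoopB' r with
  | case1 => intro h; cases h
  | case2 r hnil w hf hdrop =>
      intro _
      have hp : w <+: r := by
        simpa [List.isPrefixOf_iff_prefix] using List.find?_some hf
      have hmem : w ∈ pvWordsB := List.mem_of_find?_eq_some hf
      have e : w ++ r.drop w.length = r := List.prefix_iff_eq_append.mp hp
      rw [← e, hdrop, List.append_nil]
      exact pvLang_single hmem
  | case3 r hnil w hf hdrop ih =>
      intro hrec
      have hp : w <+: r := by
        simpa [List.isPrefixOf_iff_prefix] using List.find?_some hf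
      have hmem : w ∈ pvWordsB := List.mem_of_find?_eq_some hf
      have e : w ++ r.drop w.length = r := List.prefix_iff_eq_append.mp hp
      rw [← e]
      exact pvLang_cons hmem (ih hrec)
  | case4 r hnil hf => intro h; cases h

theorem pvB_complete (ws : List (List Char)) (hw : ∀ w ∈ ws, w ∈ pvWordsB)
    (hne : ws.flatten ≠ []) : pvLoopB' ws.flatten = true := by
  induction ws with
  | nil => simp at hne
  | cons w ws' ih =>
      have hwmem : w ∈ pvWordsB := hw w (by simp)
      have hwtl : ∀ x ∈ ws', x ∈ pvWordsB := fun x hx => hw x (by simp [hx])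
      simp only [pvWordsB, List.mem_cons, List.not_mem_nil, or_false] at hwmem
      simp only [List.flatten_cons]
      have hfind : pvWordsB.find? (fun x => x.isPrefixOf (w ++ ws'.flatten)) = some w := by
        rcases hwmem with rfl|rfl|rfl|rfl <;>
          simp [pvWordsB, List.find?, List.isPrefixOf, List.cons_prefix_cons,
            pv_lit_maerd, pv_lit_remaerd, pv_lit_esare, pv_lit_resare, List.cons_append,
            List.nil_append, List.prefix_append]
      have hne' : w ++ ws'.flatten ≠ [] := by
        rcases hwmem with rfl|rfl|rfl|rfl <;> simp
      rw [pvLoopB', dif_neg hne']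
      split
      · rename_i w' hf'
        injection (hfind.symm.trans hf') with h; subst h
        rw [List.drop_left]
        by_cases hrest : ws'.flatten = []
        · rw [if_pos hrest]
        · rw [if_neg hrest]
          exact ih hwtl hrest
      · rename_i hf'
        exact absurd (hfind.symm.trans hf') (by simp)

theorem pvRevWordF {w : List Char} (h : w ∈ pvWordsF) : w.reverse ∈ pvWordsB := by
  fin_cases h <;> decide

theorem pvRevWordB {w : List Char} (h : w ∈ pvWordsB) : w.reverse ∈ pvWordsF := by
  fin_cases h <;> decide

theorem pvLang_reverse (l : List Char) (h : pvLang pvWordsF l) : pvLang pvWordsB l.reverse := by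
  obtain ⟨ws, hm, rfl⟩ := h
  refine ⟨(ws.map List.reverse).reverse, ?_, ?_⟩
  · intro x hx
    simp only [List.mem_reverse, List.mem_map] at hx
    obtain ⟨w, hw, rfl⟩ := hx
    exact pvRevWordF (hm w hw)
  · exact List.reverse_flatten

theorem pvLang_reverse' (r : List Char) (h : pvLang pvWordsB r) : pvLang pvWordsF r.reverse := by
  obtain ⟨ws, hm, rfl⟩ := h
  refine ⟨(ws.map List.reverse).reverse, ?_, ?_⟩
  · intro x hx
    simp only [List.mem_reverse, List.mem_map] at hx
    obtain ⟨w, hw, rfl⟩ := hx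
    exact pvRevWordB (hm w hw)
  · exact List.reverse_flatten

-- ===== VERDICT (by name: the statement is the Claim_ definition above) =====
theorem match_dream_eraser_spec : Claim_equal_match_dream_eraser := by
  intro s _hdom hpre
  unfold Spec_match_dream_eraser match_dream_eraser match_dream_eraser_alt
  have hl : s.toList ≠ [] := by
    intro h; apply hpre; exact String.toList_injective (by simpa using h)
  rw [pvLoopA_eq, pvLoopB_eq]
  simp only [List.drop_zero]
  rcases hA : pvLoopA' s.toList with _ | _
  · rcases hB : pvLoopB' s.toList.reverse with _ | _
    · rfl
    · exfalso
      obtain ⟨ws, hw, hfl⟩ := pvLang_reverse' _ (pvB_sound _ hB)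
      have : pvLoopA' s.toList = true := by
        have : s.toList = ws.flatten := by
          rw [← hfl]; simp
        rw [this] at hl ⊢
        exact pvA_complete ws hw hl
      simp [this] at hA
  · obtain ⟨ws, hw, hfl⟩ := pvLang_reverse _ (pvA_sound _ hA)
    have hne : ws.flatten ≠ [] := by rw [← hfl]; simpa using hl
    rw [hfl]
    exact (pvB_complete ws hw hne).symm
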